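-- pv_equiv track=rewrite | github.com/pr-poehali-dev/project-zenith-2134 | backend/skat-targeted/index.py | get_recommendations_for_pathogen
-- ===== SOURCE A (Python) =====
-- DRUGS = {
--     "цефтриаксон": {
--         "dose": "1-2 г в/в 1 р/сут",
--         "renal_adjustment": "Клир. креат. >30: без изменений; <30: 1 г/сут",
--     },
--     "меропенем": {
--         "dose": "1 г в/в 3 р/сут (до 2 г 3 р/сут)",
--         "renal_adjustment": "Клир. креат. 26-50: 1 г 2 р/сут; 10-25: 0.5 г 2 р/сут; <10: 0.5 г 1 р/сут",
--     },
--     "пиперациллин/тазобактам": {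
--         "dose": "4.5 г в/в 3-4 р/сут",
--         "renal_adjustment": "Клир. креат. 20-40: 4.5 г 2 р/сут; <20: 4.5 г 1 р/сут",
--     },
--     "ванкомицин": {
--         "dose": "15-20 мг/кг каждые 8-12ч, мониторинг",
--         "renal_adjustment": "Коррекция по клиренсу креатинина (интервал)",
--     },
--     "линезолид": {
--         "dose": "600 мг в/в или внутрь 2 р/сут",
--         "renal_adjustment": "Коррекции не требуется",
--     },
--     "левофлоксацин": {
--         "dose": "500 мг 1-2 р/сут",
--         "renal_adjustment": "Клир. креат. 20-49: 250 мг 1-2 р/сут; <20: 250 мг 1 р/сут",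
--     },
--     "амикацин": {
--         "dose": "15-20 мг/кг 1 р/сут",
--         "renal_adjustment": "Удлинение интервала при клир. <60",
--     },
--     "цефепим": {
--         "dose": "1-2 г в/в 2-3 р/сут",
--         "renal_adjustment": "Клир. креат. 30-60: 1-2 г 2 р/сут; 11-29: 1-2 г 1 р/сут; <10: 0.5-1 г 1 р/сут",
--     },
--     "метронидазол": {
--         "dose": "500 мг в/в 3 р/сут",
--         "renal_adjustment": "Коррекции не требуется",
--     },
--     "амоксициллин/клавуланат": {
--         "dose": "1.2 г в/в 3 р/сут",
--         "renal_adjustment": "Клир. креат. <30: 1.2 г 2 р/сут",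
--     },
--     "оксациллин": {
--         "dose": "2 г в/в 4-6 р/сут",
--         "renal_adjustment": "Коррекции не требуется",
--     },
--     "колистин": {
--         "dose": "9 млн МЕ нагрузочная, затем 4.5 млн МЕ 2 р/сут",
--         "renal_adjustment": "Коррекция по клиренсу креатинина",
--     },
-- }
--
-- def get_recommendations_for_pathogen(pathogen_data, allergy, crcl):
--     """Build targeted therapy recommendations based on sensitivity profile."""
--     sensitivity = pathogen_data["sensitivity"]
--     recommendations = []
--
--     for drug_name, status in sensitivity.items():
--         if status == "R":
--             continue  # Skip resistant drugs
--
--         drug_info = DRUGS.get(drug_name)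
--         if drug_info is None:
--             # Drug not in our dosing table - still recommend with basic info
--             rec = {
--                 "drug": drug_name,
--                 "sensitivity": status,
--                 "dose": "Дозировка не указана",
--                 "renal_adjustment": "Нет данных",
--             }
--         else:
--             rec = {
--                 "drug": drug_name,
--                 "sensitivity": status,
--                 "dose": drug_info["dose"],
--                 "renal_adjustment": drug_info["renal_adjustment"],
--             }
--
--         # Mark intermediate sensitivity
--         if status == "I":
--             rec["note"] = "Промежуточная чувствительность — использовать с осторожностью, увеличить дозу"
--
--         recommendations.append(rec)
--
--     # Sort: S first, then I
--     recommendations.sort(key=lambda r: 0 if r.get("sensitivity") == "S" else 1)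
--
--     return recommendations
-- ===== SOURCE B (Python) =====
-- DRUGS = {
--     "цефтриаксон": {
--         "dose": "1-2 г в/в 1 р/сут",
--         "renal_adjustment": "Клир. креат. >30: без изменений; <30: 1 г/сут",
--     },
--     "меропенем": {
--         "dose": "1 г в/в 3 р/сут (до 2 г 3 р/сут)",
--         "renal_adjustment": "Клир. креат. 26-50: 1 г 2 р/сут; 10-25: 0.5 г 2 р/сут; <10: 0.5 г 1 р/сут",
--     },
--     "пиперациллин/тазобактам": {
--         "dose": "4.5 г в/в 3-4 р/сут",
--         "renal_adjustment": "Клир. креат. 20-40: 4.5 г 2 р/сут; <20: 4.5 г 1 р/сут",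
--     },
--     "ванкомицин": {
--         "dose": "15-20 мг/кг каждые 8-12ч, мониторинг",
--         "renal_adjustment": "Коррекция по клиренсу креатинина (интервал)",
--     },
--     "линезолид": {
--         "dose": "600 мг в/в или внутрь 2 р/сут",
--         "renal_adjustment": "Коррекции не требуется",
--     },
--     "левофлоксацин": {
--         "dose": "500 мг 1-2 р/сут",
--         "renal_adjustment": "Клир. креат. 20-49: 250 мг 1-2 р/сут; <20: 250 мг 1 р/сут",
--     },
--     "амикацин": {
--         "dose": "15-20 мг/кг 1 р/сут",
--         "renal_adjustment": "Удлинение интервала при клир. <60",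
--     },
--     "цефепим": {
--         "dose": "1-2 г в/в 2-3 р/сут",
--         "renal_adjustment": "Клир. креат. 30-60: 1-2 г 2 р/сут; 11-29: 1-2 г 1 р/сут; <10: 0.5-1 г 1 р/сут",
--     },
--     "метронидазол": {
--         "dose": "500 мг в/в 3 р/сут",
--         "renal_adjustment": "Коррекции не требуется",
--     },
--     "амоксициллин/клавуланат": {
--         "dose": "1.2 г в/в 3 р/сут",
--         "renal_adjustment": "Клир. креат. <30: 1.2 г 2 р/сут",
--     },
--     "оксациллин": {
--         "dose": "2 г в/в 4-6 р/сут",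
--         "renal_adjustment": "Коррекции не требуется",
--     },
--     "колистин": {
--         "dose": "9 млн МЕ нагрузочная, затем 4.5 млн МЕ 2 р/сут",
--         "renal_adjustment": "Коррекция по клиренсу креатинина",
--     },
-- }
--
--
-- def get_recommendations_for_pathogen(pathogen_data, allergy, crcl):
--     """Build targeted therapy recommendations based on sensitivity profile.
--
--     One pass, no sort: susceptible ('S') drugs are collected in a `primary`
--     bucket and every other non-resistant drug in an `other` bucket; the
--     concatenation reproduces the stable-sort order of the original.
--     """
--     primary = []
--     other = []
--     for drug_name, status in pathogen_data["sensitivity"].items():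
--         if status == "R":
--             continue
--         info = DRUGS.get(drug_name, {"dose": "Дозировка не указана", "renal_adjustment": "Нет данных"})
--         rec = {
--             "drug": drug_name,
--             "sensitivity": status,
--             "dose": info["dose"],
--             "renal_adjustment": info["renal_adjustment"],
--         }
--         if status == "I":
--             rec["note"] = "Промежуточная чувствительность — использовать с осторожностью, увеличить дозу"
--         (primary if status == "S" else other).append(rec)
--     return primary + other
-- ===== Notes on version B (the rewrite author's own statement) =====
-- stated objective: simpler
-- what changed: B drops the final sort entirely: during the single pass each built record is appended to a `primary` bucket (status 'S') or an `other` bucket (any other non-resistant status) and the result is primary + other, which equals the original stable sort on the 0/1 key; the missing-drug fallback uses dict.get with a default instead of an explicit None branch.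
import Mathlib
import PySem

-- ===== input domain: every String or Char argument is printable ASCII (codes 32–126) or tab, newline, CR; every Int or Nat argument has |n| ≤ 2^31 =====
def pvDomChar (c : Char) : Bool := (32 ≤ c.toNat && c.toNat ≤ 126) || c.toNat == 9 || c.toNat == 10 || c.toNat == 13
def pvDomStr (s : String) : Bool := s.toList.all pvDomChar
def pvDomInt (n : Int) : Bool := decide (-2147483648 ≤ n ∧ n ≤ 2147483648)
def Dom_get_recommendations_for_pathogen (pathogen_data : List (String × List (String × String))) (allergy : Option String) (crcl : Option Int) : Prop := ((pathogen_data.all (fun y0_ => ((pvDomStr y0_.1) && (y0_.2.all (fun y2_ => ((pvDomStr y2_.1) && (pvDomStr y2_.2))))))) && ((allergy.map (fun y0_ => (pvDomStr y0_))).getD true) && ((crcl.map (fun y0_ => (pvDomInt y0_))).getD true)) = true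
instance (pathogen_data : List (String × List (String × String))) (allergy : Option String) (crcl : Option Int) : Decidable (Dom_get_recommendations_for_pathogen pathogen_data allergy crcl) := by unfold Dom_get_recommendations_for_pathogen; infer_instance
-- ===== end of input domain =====

-- B replaces A's final stable sort by bucketing each record into a `primary` ('S') or `other` list
-- during the single pass and returning primary ++ other (simpler; no sort call).
-- If pathogen_data has no "sensitivity" key both Pythons raise KeyError: Pre_ excludes exactly that.


-- shared module constant: the DRUGS dosing table (drug -> (dose, renal_adjustment))
def pvDRUGS : List (String × String × String) := [
  ("цефтриаксон", "1-2 г в/в 1 р/сут", "Клир. креат. >30: без изменений; <30: 1 г/сут"),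
  ("меропенем", "1 г в/в 3 р/сут (до 2 г 3 р/сут)", "Клир. креат. 26-50: 1 г 2 р/сут; 10-25: 0.5 г 2 р/сут; <10: 0.5 г 1 р/сут"),
  ("пиперациллин/тазобактам", "4.5 г в/в 3-4 р/сут", "Клир. креат. 20-40: 4.5 г 2 р/сут; <20: 4.5 г 1 р/сут"),
  ("ванкомицин", "15-20 мг/кг каждые 8-12ч, мониторинг", "Коррекция по клиренсу креатинина (интервал)"),
  ("линезолид", "600 мг в/в или внутрь 2 р/сут", "Коррекции не требуется"),
  ("левофлоксацин", "500 мг 1-2 р/сут", "Клир. креат. 20-49: 250 мг 1-2 р/сут; <20: 250 мг 1 р/сут"),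
  ("амикацин", "15-20 мг/кг 1 р/сут", "Удлинение интервала при клир. <60"),
  ("цефепим", "1-2 г в/в 2-3 р/сут", "Клир. креат. 30-60: 1-2 г 2 р/сут; 11-29: 1-2 г 1 р/сут; <10: 0.5-1 г 1 р/сут"),
  ("метронидазол", "500 мг в/в 3 р/сут", "Коррекции не требуется"),
  ("амоксициллин/клавуланат", "1.2 г в/в 3 р/сут", "Клир. креат. <30: 1.2 г 2 р/сут"),
  ("оксациллин", "2 г в/в 4-6 р/сут", "Коррекции не требуется"),
  ("колистин", "9 млн МЕ нагрузочная, затем 4.5 млн МЕ 2 р/сут", "Коррекция по клиренсу креатинина")]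

def pvNote : String := "Промежуточная чувствительность — использовать с осторожностью, увеличить дозу"

-- ===== PORT A =====
-- loop body of A: skip "R", build the rec dict (None-branch vs table branch), add the "I" note, append
def pvStepA (recommendations : List (List (String × String))) (item : String × String) : List (List (String × String)) :=
  if item.2 == "R" then recommendations
  else
    let r : List (String × String) :=
      match (PySem.Dict.mk pvDRUGS).get? item.1 with
      | none => [("drug", item.1), ("sensitivity", item.2), ("dose", "Дозировка не указана"), ("renal_adjustment", "Нет данных")]
      | some drug_info => [("drug", item.1), ("sensitivity", item.2), ("dose", drug_info.1), ("renal_adjustment", drug_info.2)]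
    let r := if item.2 == "I" then r ++ [("note", pvNote)] else r
    recommendations ++ [r]

-- sort key: 0 if r.get("sensitivity") == "S" else 1
def pvSortKey (r : List (String × String)) : Int :=
  if (PySem.Dict.mk r).get? "sensitivity" == some "S" then 0 else 1

def get_recommendations_for_pathogen (pathogen_data : List (String × List (String × String))) (allergy : Option String) (crcl : Option Int) : List (List (String × String)) :=
  match (PySem.Dict.mk pathogen_data).get? "sensitivity" with
  | none => []  -- KeyError in Python; excluded by Pre_
  | some sensitivity =>
    let recommendations := sensitivity.foldl pvStepA []
    PySem.List.sorted recommendations pvSortKey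

-- ===== PORT B =====
-- loop body of B: skip "R", build the rec via DRUGS.get with a default, bucket by status == "S"
def pvStepB (acc : List (List (String × String)) × List (List (String × String))) (item : String × String) : List (List (String × String)) × List (List (String × String)) :=
  if item.2 == "R" then acc
  else
    let info := ((PySem.Dict.mk pvDRUGS).get? item.1).getD ("Дозировка не указана", "Нет данных")
    let r : List (String × String) := [("drug", item.1), ("sensitivity", item.2), ("dose", info.1), ("renal_adjustment", info.2)]
    let r := if item.2 == "I" then r ++ [("note", pvNote)] else r
    if item.2 == "S" then (acc.1 ++ [r], acc.2) else (acc.1, acc.2 ++ [r])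

def get_recommendations_for_pathogen_alt (pathogen_data : List (String × List (String × String))) (allergy : Option String) (crcl : Option Int) : List (List (String × String)) :=
  match (PySem.Dict.mk pathogen_data).get? "sensitivity" with
  | none => []  -- KeyError in Python; excluded by Pre_
  | some sensitivity =>
    let buckets := sensitivity.foldl pvStepB ([], [])
    buckets.1 ++ buckets.2

-- ===== PRECONDITION & SPEC =====
-- Pre_ excludes exactly the inputs where Python raises KeyError: pathogen_data without a "sensitivity" key.
def Pre_get_recommendations_for_pathogen (pathogen_data : List (String × List (String × String))) (allergy : Option String) (crcl : Option Int) : Prop :=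
  "sensitivity" ∈ pathogen_data.map Prod.fst
instance (pathogen_data : List (String × List (String × String))) (allergy : Option String) (crcl : Option Int) : Decidable (Pre_get_recommendations_for_pathogen pathogen_data allergy crcl) := by unfold Pre_get_recommendations_for_pathogen; infer_instance

def pvWitness_get_recommendations_for_pathogen : (List (String × List (String × String))) × Option String × Option Int :=
  ([("sensitivity", [("ampicillin", "S"), ("x", "I"), ("y", "R")])], none, some 50)

def Spec_get_recommendations_for_pathogen (pathogen_data : List (String × List (String × String))) (allergy : Option String) (crcl : Option Int) (out : List (List (String × String))) : Prop := out = get_recommendations_for_pathogen_alt pathogen_data allergy crcl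
instance (pathogen_data : List (String × List (String × String))) (allergy : Option String) (crcl : Option Int) (out : List (List (String × String))) : Decidable (Spec_get_recommendations_for_pathogen pathogen_data allergy crcl out) := by unfold Spec_get_recommendations_for_pathogen; infer_instance

-- ===== CLAIM (what is proved, stated in full; the proofs are below) =====
def Claim_equal_get_recommendations_for_pathogen : Prop := ∀ (pathogen_data : List (String × List (String × String))) (allergy : Option String) (crcl : Option Int), Dom_get_recommendations_for_pathogen pathogen_data allergy crcl → Pre_get_recommendations_for_pathogen pathogen_data allergy crcl → Spec_get_recommendations_for_pathogen pathogen_data allergy crcl (get_recommendations_for_pathogen pathogen_data allergy crcl)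

-- ===== LEMMAS AND PROOFS =====

-- inserting behind a block it does not go before
lemma insertBy_append_of_forall_not_before {α : Type} (before : α → α → Bool) (x : α)
    (as bs : List α) (h : ∀ a ∈ as, before x a = false) :
    PySem.List.insertBy before x (as ++ bs) = as ++ PySem.List.insertBy before x bs := by
  induction as with
  | nil => rfl
  | cons a as ih =>
    simp only [List.cons_append, PySem.List.insertBy, h a (by simp), Bool.false_eq_true, if_false]
    exact congrArg _ (ih fun a ha => h a (by simp [ha]))

-- a stable sort on a 0/1-valued key is the two-bucket split
lemma sorted_binary {α : Type} (key : α → Int) (hk : ∀ x, key x = 0 ∨ key x = 1) (xs : List α) :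
    PySem.List.sorted xs key =
      xs.filter (fun x => key x == 0) ++ xs.filter (fun x => !(key x == 0)) := by
  rw [PySem.List.sorted_eq_foldl_insertBy]
  induction xs using List.reverseRecOn with
  | nil => rfl
  | append_singleton xs x ih =>
    rw [List.foldl_append, List.foldl_cons, List.foldl_nil, ih]
    rcases hk x with h0 | h1
    · rw [insertBy_append_of_forall_not_before]
      · cases hb : xs.filter (fun x => !(key x == 0)) with
        | nil => simp [PySem.List.insertBy, List.filter_append, h0, hb]
        | cons b t =>
          have hbkey : key b = 1 := by
            have : b ∈ xs.filter (fun x => !(key x == 0)) := by rw [hb]; simp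
            rcases hk b with h | h
            · simp [List.mem_filter, h] at this
            · exact h
          simp [PySem.List.insertBy, h0, hbkey, List.filter_append, hb]
      · intro a ha
        rcases hk a with h | h
        · simp [h0, h]
        · simp [List.mem_filter, h] at ha
    · rw [PySem.List.insertBy_of_forall_not_before]
      · simp [List.filter_append, h1]
      · intro a ha
        simp only [List.mem_append] at ha
        rcases hk a with h | h <;> simp [h1, h]

lemma pvSortKey_binary : ∀ r, pvSortKey r = 0 ∨ pvSortKey r = 1 := by
  intro r; unfold pvSortKey; split <;> simp

-- the sort key of a record whose second entry is its "sensitivity" field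
lemma key_of_rec (dn st : String) (rest : List (String × String)) :
    pvSortKey (("drug", dn) :: ("sensitivity", st) :: rest) = if st == "S" then 0 else 1 := by
  simp only [pvSortKey, PySem.Dict.get?_mk_cons]
  norm_num
  split <;> split <;> simp_all

lemma key_of_built (dn st d ra : String) :
    pvSortKey (if (st == "I") = true
      then [("drug", dn), ("sensitivity", st), ("dose", d), ("renal_adjustment", ra)] ++ [("note", pvNote)]
      else [("drug", dn), ("sensitivity", st), ("dose", d), ("renal_adjustment", ra)]) =
      if st == "S" then 0 else 1 := by
  split
  · simp only [List.cons_append, List.nil_append]; rw [key_of_rec]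
  · rw [key_of_rec]

lemma pvStepA_acc (acc : List (List (String × String))) (item : String × String) :
    pvStepA acc item = acc ++ pvStepA [] item := by
  unfold pvStepA; split <;> simp

lemma foldl_pvStepA_acc (l : List (String × String)) (acc : List (List (String × String))) :
    l.foldl pvStepA acc = acc ++ l.foldl pvStepA [] := by
  induction l generalizing acc with
  | nil => simp
  | cons i l ih =>
    rw [List.foldl_cons, List.foldl_cons, pvStepA_acc, ih, ih (pvStepA [] i), List.append_assoc]

-- the main loop correspondence: B's two buckets are the two key-filters of A's list
lemma loop_buckets (l : List (String × String)) (p o : List (List (String × String))) :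
    l.foldl pvStepB (p, o) =
      (p ++ (l.foldl pvStepA []).filter (fun r => pvSortKey r == 0),
       o ++ (l.foldl pvStepA []).filter (fun r => !(pvSortKey r == 0))) := by
  induction l generalizing p o with
  | nil => simp
  | cons i l ih =>
    rw [List.foldl_cons, List.foldl_cons, foldl_pvStepA_acc]
    by_cases hR : (i.2 == "R") = true
    · have hA : pvStepA [] i = [] := by unfold pvStepA; rw [hR]; simp
      have hB : pvStepB (p, o) i = (p, o) := by unfold pvStepB; rw [hR]; simp
      rw [hA, hB, ih]; simp
    · rw [Bool.not_eq_true] at hR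
      -- the single record this item contributes
      set q : List (String × String) :=
        (let info := ((PySem.Dict.mk pvDRUGS).get? i.1).getD ("Дозировка не указана", "Нет данных")
         let r : List (String × String) :=
           [("drug", i.1), ("sensitivity", i.2), ("dose", info.1), ("renal_adjustment", info.2)]
         if i.2 == "I" then r ++ [("note", pvNote)] else r) with hq
      have hA : pvStepA [] i = [q] := by
        rw [hq]
        unfold pvStepA
        rw [hR]
        rcases hd : (PySem.Dict.mk pvDRUGS).get? i.1 with _ | info <;> simp
      have hB : pvStepB (p, o) i = if i.2 == "S" then (p ++ [q], o) else (p, o ++ [q]) := by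
        unfold pvStepB
        rw [hR, hq]
        simp
      have hkey : (pvSortKey q == 0) = (i.2 == "S") := by
        have : pvSortKey q = if i.2 == "S" then 0 else 1 := by
          rw [hq]
          exact key_of_built i.1 i.2 _ _
        rw [this]; by_cases hS : (i.2 == "S") = true <;> simp [hS]
      rw [hA, hB, ih]
      by_cases hS : (i.2 == "S") = true
      · rw [if_pos hS]
        have h0 : (pvSortKey q == 0) = true := by rw [hkey, hS]
        simp [h0, List.append_assoc]
      · rw [if_neg (by simp_all)]
        have h0 : (pvSortKey q == 0) = false := by rw [hkey]; simp_all
        simp [h0, List.append_assoc]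

-- ===== VERDICT (by name: the statement is the Claim_ definition above) =====
theorem get_recommendations_for_pathogen_spec : Claim_equal_get_recommendations_for_pathogen := by
  intro pathogen_data allergy crcl _ hpre
  unfold Spec_get_recommendations_for_pathogen
  unfold get_recommendations_for_pathogen get_recommendations_for_pathogen_alt
  rcases h : (PySem.Dict.mk pathogen_data).get? "sensitivity" with _ | sensitivity
  · exact absurd hpre (by simpa [PySem.Dict.get?_eq_none_iff_not_mem_keys, Pre_get_recommendations_for_pathogen] using h)
  · simp only
    rw [sorted_binary pvSortKey pvSortKey_binary, loop_buckets]
    simp
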